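-- pv_equiv track=rewrite | github.com/soupday/CCiC-Blender-Pipeline-Plugin | btp/cc.py | safe_export_name
-- ===== SOURCE A (Python) =====
-- INVALID_EXPORT_CHARACTERS: str = "`!\"$%^&*()+-=[]{}:@~;'#<>?,./\| "
--
-- DIGITS: str = "0123456789"
--
-- def safe_export_name(name, is_material = False):
--     for char in INVALID_EXPORT_CHARACTERS:
--         if char in name:
--             name = name.replace(char, "_")
--     if is_material:
--         if name[0] in DIGITS:
--             name = f"_{name}"
--     return name
-- ===== SOURCE B (Python) =====
-- INVALID_EXPORT_CHARACTERS: str = "`!\"$%^&*()+-=[]{}:@~;'#<>?,./\| "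
--
-- DIGITS: str = "0123456789"
--
-- def safe_export_name(name, is_material = False):
--     invalid = set(INVALID_EXPORT_CHARACTERS)
--     out = "".join("_" if c in invalid else c for c in name)
--     if is_material and out and out[0] in DIGITS:
--         out = "_" + out
--     return out
-- ===== Notes on version B (the rewrite author's own statement) =====
-- stated objective: idiomatic
-- what changed: B builds the sanitized name in a single pass over the input's characters (membership test against a set of the invalid alphabet) instead of A's loop over the 31 invalid characters each doing a substring scan and a full replace pass.
-- outside the precondition, e.g. on safe_export_name('', True): A raises IndexError, B returns ''
import Mathlib
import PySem

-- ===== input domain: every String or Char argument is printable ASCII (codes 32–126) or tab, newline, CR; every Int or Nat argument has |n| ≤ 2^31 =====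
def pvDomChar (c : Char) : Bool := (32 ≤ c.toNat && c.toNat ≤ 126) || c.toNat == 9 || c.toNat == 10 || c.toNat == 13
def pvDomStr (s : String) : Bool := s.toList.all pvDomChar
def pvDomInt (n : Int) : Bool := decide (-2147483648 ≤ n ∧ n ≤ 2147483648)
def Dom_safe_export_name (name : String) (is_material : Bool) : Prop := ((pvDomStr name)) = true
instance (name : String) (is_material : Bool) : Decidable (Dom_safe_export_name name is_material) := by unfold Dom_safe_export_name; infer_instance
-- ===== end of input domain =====

-- B replaces A's loop over the invalid alphabet (substring test + full replace pass per invalid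
-- character) by one pass over the input's characters; return values only, no mutation involved.

def INVALID_EXPORT_CHARACTERS : String := "`!\"$%^&*()+-=[]{}:@~;'#<>?,./\\| "

def DIGITS : String := "0123456789"

-- ===== PORT A =====
def safe_export_name (name : String) (is_material : Bool) : String :=
  -- for char in INVALID_EXPORT_CHARACTERS: if char in name: name = name.replace(char, "_")
  let n := INVALID_EXPORT_CHARACTERS.toList.foldl
    (fun n ch =>
      if PySem.Str.isIn (String.ofList [ch]) n then PySem.Str.replace n (String.ofList [ch]) "_" else n)
    name
  if is_material then
    match PySem.Str.pyGet? n 0 with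
    | some c =>
        if PySem.Str.isIn (String.ofList [c]) DIGITS then String.ofList ('_' :: n.toList) else n
    | none => n   -- name[0] raises IndexError in Python; excluded by Pre_
  else n

-- ===== PORT B =====
def safe_export_name_alt (name : String) (is_material : Bool) : String :=
  let invalid := PySem.Set.ofList INVALID_EXPORT_CHARACTERS.toList
  let out := String.ofList (name.toList.map (fun c => if PySem.Set.contains invalid c then '_' else c))
  if is_material then
    match out.toList with
    | [] => out
    | c :: _ =>
        if PySem.Str.isIn (String.ofList [c]) DIGITS then String.ofList ('_' :: out.toList) else out
  else out

-- ===== PRECONDITION & SPEC =====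
-- Pre_ excludes exactly the inputs where A raises IndexError: is_material with an empty name.
def Pre_safe_export_name (name : String) (is_material : Bool) : Prop :=
  is_material = true → name ≠ ""
instance (name : String) (is_material : Bool) : Decidable (Pre_safe_export_name name is_material) := by
  unfold Pre_safe_export_name; infer_instance

def pvWitness_safe_export_name : String × Bool := ("7 skin.mat", true)

def Spec_safe_export_name (name : String) (is_material : Bool) (out : String) : Prop :=
  out = safe_export_name_alt name is_material
instance (name : String) (is_material : Bool) (out : String) : Decidable (Spec_safe_export_name name is_material out) := by
  unfold Spec_safe_export_name; infer_instance

-- ===== CLAIM (what is proved, stated in full; the proofs are below) =====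
def Claim_equal_safe_export_name : Prop :=
  ∀ (name : String) (is_material : Bool), Dom_safe_export_name name is_material →
    Pre_safe_export_name name is_material →
    Spec_safe_export_name name is_material (safe_export_name name is_material)

-- ===== LEMMAS AND PROOFS =====

-- single-character str.replace is a pointwise map over the characters
theorem replace_go_single (c : Char) (fuel : Nat) :
    ∀ (l acc : List Char), l.length ≤ fuel →
      PySem.Chars.replace.go [c] ['_'] fuel l acc
        = acc.reverse ++ l.map (fun x => if x = c then '_' else x) := by
  induction fuel with
  | zero =>
      intro l acc h
      have : l = [] := List.length_eq_zero_iff.mp (Nat.le_zero.mp h)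
      subst this
      simp [PySem.Chars.replace.go]
  | succ n ih =>
      intro l acc h
      cases l with
      | nil => simp [PySem.Chars.replace.go]
      | cons a t =>
          by_cases hac : a = c
          · subst hac
            have hp : List.isPrefixOf [a] (a :: t) = true := by
              simp [List.isPrefixOf]
            simp only [PySem.Chars.replace.go, hp, if_pos, List.length_cons, List.length_nil,
              List.drop_succ_cons, List.drop_zero, List.reverse_cons, List.reverse_nil,
              List.nil_append, List.singleton_append]
            rw [ih t ('_' :: acc) (by simpa using Nat.lt_succ_iff.mp (by simpa using h))]
            simp
          · have hp' : List.isPrefixOf [c] (a :: t) = false := by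
              simp [List.isPrefixOf, BEq.beq]
              intro hh; exact absurd hh (Ne.symm hac)
            simp only [PySem.Chars.replace.go, hp', if_neg, Bool.false_eq_true, not_false_iff]
            rw [ih t (a :: acc) (by simpa using Nat.lt_succ_iff.mp (by simpa using h))]
            simp [hac]

theorem replace_single (c : Char) (s : String) :
    (if PySem.Str.isIn (String.ofList [c]) s then PySem.Str.replace s (String.ofList [c]) "_" else s).toList
      = s.toList.map (fun x => if x = c then '_' else x) := by
  by_cases h : PySem.Str.isIn (String.ofList [c]) s = true
  · rw [if_pos h, PySem.Str.toList_replace]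
    show PySem.Chars.replace s.toList (String.ofList [c]).toList (String.toList "_")
        = s.toList.map (fun x => if x = c then '_' else x)
    have h1 : (String.ofList [c]).toList = [c] := String.toList_ofList
    have h2 : (String.toList "_") = ['_'] := by decide
    rw [h1, h2]
    unfold PySem.Chars.replace
    simp only [List.isEmpty_cons, if_neg, Bool.false_eq_true, not_false_iff]
    rw [replace_go_single c s.toList.length s.toList [] (le_refl _)]
    simp
  · rw [if_neg h]
    have hc : c ∉ s.toList := by
      intro hmem
      apply h
      rw [PySem.Str.isIn_iff_infix, String.toList_ofList]
      obtain ⟨u, v, huv⟩ := List.append_of_mem hmem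
      exact ⟨u, v, by simp [huv]⟩
    have : ∀ x ∈ s.toList, (if x = c then '_' else x) = x := by
      intro x hx
      rw [if_neg]; intro he; exact hc (he ▸ hx)
    rw [List.map_congr_left this]
    simp

theorem fold_replace (cs : List Char) :
    '_' ∉ cs → ∀ (s : String),
      (cs.foldl (fun n ch =>
          if PySem.Str.isIn (String.ofList [ch]) n then PySem.Str.replace n (String.ofList [ch]) "_" else n)
        s).toList
      = s.toList.map (fun x => if cs.contains x then '_' else x) := by
  induction cs with
  | nil => intro _ s; simp
  | cons c cs ih =>
      intro hnu s
      have hnu' : '_' ∉ cs := fun h => hnu (List.mem_cons_of_mem _ h)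
      have hnc : '_' ≠ c := fun h => hnu (h ▸ List.mem_cons_self ..)
      rw [List.foldl_cons, ih hnu', replace_single, List.map_map]
      apply List.map_congr_left
      intro x _
      by_cases hxc : x = c
      · subst hxc
        simp [Function.comp]
      · have hxc' : (x == c) = false := by simpa using hxc
        simp [Function.comp, hxc]

-- ===== VERDICT (by name: the statement is the Claim_ definition above) =====
theorem safe_export_name_spec : Claim_equal_safe_export_name := by
  intro name is_material _ hpre
  unfold Spec_safe_export_name safe_export_name safe_export_name_alt
  have hnu : '_' ∉ INVALID_EXPORT_CHARACTERS.toList := by decide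
  have hfold := fold_replace INVALID_EXPORT_CHARACTERS.toList hnu name
  set f : Char → Char := fun x => if INVALID_EXPORT_CHARACTERS.toList.contains x then '_' else x with hf
  set n := INVALID_EXPORT_CHARACTERS.toList.foldl
    (fun n ch =>
      if PySem.Str.isIn (String.ofList [ch]) n then PySem.Str.replace n (String.ofList [ch]) "_" else n)
    name with hn
  have hset : ∀ c : Char,
      PySem.Set.contains (PySem.Set.ofList INVALID_EXPORT_CHARACTERS.toList) c
        = INVALID_EXPORT_CHARACTERS.toList.contains c := by
    intro c
    by_cases hc : c ∈ INVALID_EXPORT_CHARACTERS.toList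
    · rw [(PySem.Set.contains_iff _ _).mpr ((PySem.Set.mem_ofList _ _).mpr hc),
        List.contains_iff_mem.mpr hc]
    · rw [Bool.eq_false_iff.mpr
          (fun hh => hc ((PySem.Set.mem_ofList _ _).mp ((PySem.Set.contains_iff _ _).mp hh))),
        Bool.eq_false_iff.mpr (fun hh => hc (List.contains_iff_mem.mp hh))]
  have hout : n.toList = name.toList.map f := hfold
  have hsame : n = String.ofList (name.toList.map
      (fun c => if PySem.Set.contains (PySem.Set.ofList INVALID_EXPORT_CHARACTERS.toList) c then '_' else c)) := by
    rw [List.map_congr_left (fun c _ => by rw [hset c]), ← hout, String.ofList_toList]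
  cases is_material with
  | false => exact hsame
  | true =>
      have hne : name ≠ "" := hpre rfl
      have hlne : name.toList ≠ [] := by
        intro h
        apply hne
        have := congrArg String.ofList h
        rwa [String.ofList_toList] at this
      simp only [if_pos]
      rw [← hsame]
      cases hl : n.toList with
      | nil =>
          exfalso
          apply hlne
          apply List.map_eq_nil_iff.mp
          rw [← hout, hl]
      | cons c t =>
          have hget : PySem.Str.pyGet? n 0 = some c := by
            rw [show ((0 : Int)) = ((0 : Nat) : Int) by simp, PySem.Str.pyGet?_natCast, hl]
            rfl
          rw [hget]
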